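-- pv_equiv track=rewrite | github.com/xiaojiudev/Waste-or-Garbage-Classification-Using-Deep-Learning | app.py | get_waste_info
-- ===== SOURCE A (Python) =====
-- WASTE_CATEGORIES = {
--     "recyclable": {
--         "classes": ["cardboard", "metal", "paper", "plastic",
--                    "brown-glass", "green-glass", "white-glass"],
--         "disposal": "Có thể tái chế. Vui lòng phân loại vào thùng rác tái chế."
--     },
--     "organic": {
--         "classes": ["biological"],
--         "disposal": "Rác hữu cơ. Có thể ủ phân hoặc xử lý bằng phương pháp sinh học."
--     },
--     "hazardous": {
--         "classes": ["battery"],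
--         "disposal": "Chất thải nguy hại. Cần xử lý đặc biệt tại các điểm thu gom chuyên dụng."
--     },
--     "other": {
--         "classes": ["clothes", "shoes"],
--         "disposal": "Đồ dùng có thể tái sử dụng hoặc quyên góp. Nếu hỏng, vui lòng bỏ vào thùng rác chung."
--     }
-- }
--
-- def get_waste_info(predicted_class : str) -> dict:
--     """Lấy thông tin phân loại và cách xử lý"""
--     for category, info in WASTE_CATEGORIES.items():
--         if predicted_class in info["classes"]:
--             return {
--                 "category": category,
--                 "disposal": info["disposal"],
--             }
--     return {
--         "category": "unknown",
--         "disposal": "Vui lòng tham khảo hướng dẫn xử lý rác tại địa phương."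
--     }
-- ===== SOURCE B (Python) =====
-- WASTE_CATEGORIES = {
--     "recyclable": {
--         "classes": ["cardboard", "metal", "paper", "plastic",
--                    "brown-glass", "green-glass", "white-glass"],
--         "disposal": "Có thể tái chế. Vui lòng phân loại vào thùng rác tái chế."
--     },
--     "organic": {
--         "classes": ["biological"],
--         "disposal": "Rác hữu cơ. Có thể ủ phân hoặc xử lý bằng phương pháp sinh học."
--     },
--     "hazardous": {
--         "classes": ["battery"],
--         "disposal": "Chất thải nguy hại. Cần xử lý đặc biệt tại các điểm thu gom chuyên dụng."
--     },
--     "other": {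
--         "classes": ["clothes", "shoes"],
--         "disposal": "Đồ dùng có thể tái sử dụng hoặc quyên góp. Nếu hỏng, vui lòng bỏ vào thùng rác chung."
--     }
-- }
--
-- # Flat index built once at module load: class name -> its info dict.
-- FLAT = {}
-- for _cat, _info in WASTE_CATEGORIES.items():
--     for _cls in _info["classes"]:
--         FLAT[_cls] = {"category": _cat, "disposal": _info["disposal"]}
--
-- def get_waste_info(predicted_class):
--     info = FLAT.get(predicted_class)
--     if info is not None:
--         return dict(info)
--     return {
--         "category": "unknown",
--         "disposal": "Vui lòng tham khảo hướng dẫn xử lý rác tại địa phương."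
--     }
-- ===== Notes on version B (the rewrite author's own statement) =====
-- stated objective: simpler
-- what changed: Replaces the per-call loop over categories with membership tests by a flat class-name -> info dict built once at module load, so each call is a single dict lookup.
import Mathlib
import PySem

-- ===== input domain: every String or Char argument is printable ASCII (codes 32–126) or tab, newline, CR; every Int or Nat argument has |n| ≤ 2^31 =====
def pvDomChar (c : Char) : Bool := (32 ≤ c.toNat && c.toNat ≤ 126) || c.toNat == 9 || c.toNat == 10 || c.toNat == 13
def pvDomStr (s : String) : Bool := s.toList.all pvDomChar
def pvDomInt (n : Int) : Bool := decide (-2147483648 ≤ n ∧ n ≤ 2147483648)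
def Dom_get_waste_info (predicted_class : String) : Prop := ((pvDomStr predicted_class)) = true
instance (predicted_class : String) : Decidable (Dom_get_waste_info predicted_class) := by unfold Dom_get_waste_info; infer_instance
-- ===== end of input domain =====

-- B replaces A's per-call scan over categories by a single lookup in a flat
-- class->info index built once; objective: simpler.


-- ===== PORT A =====
-- WASTE_CATEGORIES: dict of category -> (classes list, disposal string), in insertion order
def WASTE_CATEGORIES : List (String × (List String × String)) :=
  [ ("recyclable", (["cardboard", "metal", "paper", "plastic",
                     "brown-glass", "green-glass", "white-glass"],
      "Có thể tái chế. Vui lòng phân loại vào thùng rác tái chế.")),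
    ("organic", (["biological"],
      "Rác hữu cơ. Có thể ủ phân hoặc xử lý bằng phương pháp sinh học.")),
    ("hazardous", (["battery"],
      "Chất thải nguy hại. Cần xử lý đặc biệt tại các điểm thu gom chuyên dụng.")),
    ("other", (["clothes", "shoes"],
      "Đồ dùng có thể tái sử dụng hoặc quyên góp. Nếu hỏng, vui lòng bỏ vào thùng rác chung.")) ]

-- the for-loop with early return over WASTE_CATEGORIES.items()
def get_waste_info_loop (predicted_class : String) :
    List (String × (List String × String)) → List (String × String)
  | [] => [("category", "unknown"),
           ("disposal", "Vui lòng tham khảo hướng dẫn xử lý rác tại địa phương.")]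
  | (category, info) :: rest =>
    if predicted_class ∈ info.1 then
      [("category", category), ("disposal", info.2)]
    else get_waste_info_loop predicted_class rest

def get_waste_info (predicted_class : String) : List (String × String) :=
  get_waste_info_loop predicted_class WASTE_CATEGORIES

-- ===== PORT B =====
-- FLAT: built once by the double loop over WASTE_CATEGORIES (Source B's module-load loop)
def FLAT : PySem.Dict String (List (String × String)) :=
  WASTE_CATEGORIES.foldl
    (fun d p => p.2.1.foldl
      (fun d2 c => d2.insert c [("category", p.1), ("disposal", p.2.2)]) d)
    PySem.Dict.empty

def get_waste_info_alt (predicted_class : String) : List (String × String) :=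
  match FLAT.get? predicted_class with
  | some info => info
  | none => [("category", "unknown"),
             ("disposal", "Vui lòng tham khảo hướng dẫn xử lý rác tại địa phương.")]

-- ===== PRECONDITION & SPEC =====
def Spec_get_waste_info (predicted_class : String) (out : List (String × String)) : Prop := out = get_waste_info_alt predicted_class
instance (predicted_class : String) (out : List (String × String)) : Decidable (Spec_get_waste_info predicted_class out) := by unfold Spec_get_waste_info; infer_instance

-- ===== CLAIM (what is proved, stated in full; the proofs are below) =====
def Claim_equal_get_waste_info : Prop := ∀ (predicted_class : String), Dom_get_waste_info predicted_class → Spec_get_waste_info predicted_class (get_waste_info predicted_class)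

-- ===== LEMMAS AND PROOFS =====

-- ===== VERDICT (by name: the statement is the Claim_ definition above) =====
theorem get_waste_info_spec : Claim_equal_get_waste_info := by
  intro pc _
  unfold Spec_get_waste_info
  by_cases h1 : pc = "cardboard";  · subst h1; decide
  by_cases h2 : pc = "metal";      · subst h2; decide
  by_cases h3 : pc = "paper";      · subst h3; decide
  by_cases h4 : pc = "plastic";    · subst h4; decide
  by_cases h5 : pc = "brown-glass"; · subst h5; decide
  by_cases h6 : pc = "green-glass"; · subst h6; decide
  by_cases h7 : pc = "white-glass"; · subst h7; decide
  by_cases h8 : pc = "biological"; · subst h8; decide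
  by_cases h9 : pc = "battery";    · subst h9; decide
  by_cases h10 : pc = "clothes";   · subst h10; decide
  by_cases h11 : pc = "shoes";     · subst h11; decide
  simp [get_waste_info, get_waste_info_loop, WASTE_CATEGORIES, get_waste_info_alt,
        FLAT, PySem.Dict.empty, PySem.Dict.insert, PySem.Dict.get?,
        beq_iff_eq, Ne.symm h1, Ne.symm h2, Ne.symm h3, Ne.symm h4,
        Ne.symm h5, Ne.symm h6, Ne.symm h7, Ne.symm h8, Ne.symm h9, Ne.symm h10, Ne.symm h11,
        h1, h2, h3, h4, h5, h6, h7, h8, h9, h10, h11]
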